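-- pv_equiv track=rewrite | github.com/IsaacICTS8/Modbus_ICTS | modbus/main - Copia.py | transforma_dados
-- ===== SOURCE A (Python) =====
-- def transforma_dados(dado_lido) :   #Funcao responsável por transformar os dados pro SCADA
--
--   aux = []
--   scada = []
--
--
--   for i in dado_lido : #Guarda os dados decimais de forma hexadecimal
--     aux.append(hex(ord(i)))
--
--
--   tamanho = 0
--
--   while tamanho<len(aux):
--
--     if tamanho != len(aux)-1 :
--         scada.append((aux[tamanho+1][2::])+(aux[tamanho][2::])) #Concatena pares de registros
--     else :
--         scada.append(aux[tamanho][2::])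
--     tamanho+=2
--
--   return scada
-- ===== SOURCE B (Python) =====
-- def transforma_dados(dado_lido):
--     stack = [format(ord(c), 'x') for c in reversed(dado_lido)]
--     scada = []
--     while stack:
--         first = stack.pop()
--         if stack:
--             scada.append(stack.pop() + first)
--         else:
--             scada.append(first)
--     return scada
-- ===== Notes on version B (the rewrite author's own statement) =====
-- stated objective: alternative
-- what changed: Replaces A's two-stage build-then-index-by-2 while loop (with a last-element index test and '0x'-prefix slicing) by a destructive stack: bare hex strings are pushed in reverse order and pairs are consumed by popping, with no index arithmetic or length tests on positions.
import Mathlib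
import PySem

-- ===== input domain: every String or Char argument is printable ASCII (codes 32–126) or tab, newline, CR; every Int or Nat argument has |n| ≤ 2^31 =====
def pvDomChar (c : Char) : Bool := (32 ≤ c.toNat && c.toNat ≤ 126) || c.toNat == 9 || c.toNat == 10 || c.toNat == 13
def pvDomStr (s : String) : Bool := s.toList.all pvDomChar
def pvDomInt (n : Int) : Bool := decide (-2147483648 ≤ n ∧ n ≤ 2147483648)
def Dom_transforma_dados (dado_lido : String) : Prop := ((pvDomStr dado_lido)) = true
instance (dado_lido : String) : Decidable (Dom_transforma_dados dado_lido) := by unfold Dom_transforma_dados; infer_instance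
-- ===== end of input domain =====

-- B replaces A's index-stepping while loop (last-element index test, '0x'-prefix slicing)
-- by a destructive stack of bare hex strings pushed in reverse order and consumed by popping
-- pairs; objective: alternative (no index arithmetic). Python strings are List Char here.

-- ===== PORT A =====
-- hex digit of n < 16, lowercase — exact port of the digits hex()/format(_,'x') produce
def hexDigit (n : Nat) : Char := if n < 10 then Char.ofNat (48 + n) else Char.ofNat (87 + n)

-- hex digits of n, lowercase, no prefix — exact for every Nat n (= format(n, 'x'))
def hexChars (n : Nat) : List Char :=
  if _h : n < 16 then [hexDigit n]
  else hexChars (n / 16) ++ [hexDigit (n % 16)]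
  decreasing_by exact Nat.div_lt_self (by omega) (by omega)

-- the while loop of A: tamanho steps by 2 over aux
def transformaLoop (aux : List (List Char)) (scada : List (List Char)) (tamanho : Nat) :
    List (List Char) :=
  if tamanho < aux.length then
    let scada' :=
      if tamanho ≠ aux.length - 1 then
        scada ++ [PySem.List.slice (PySem.List.pyGetD aux ((tamanho : Int) + 1) []) (some 2) none
                  ++ PySem.List.slice (PySem.List.pyGetD aux (tamanho : Int) []) (some 2) none]
      else
        scada ++ [PySem.List.slice (PySem.List.pyGetD aux (tamanho : Int) []) (some 2) none]
    transformaLoop aux scada' (tamanho + 2)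
  else scada
  termination_by aux.length - tamanho

def transforma_dados (dado_lido : String) : List String :=
  -- aux: hex(ord(i)) = "0x" ++ digits, accumulated by append as in A's for loop
  (transformaLoop (dado_lido.toList.foldl (fun acc i => acc ++ [['0', 'x'] ++ hexChars i.toNat]) []) [] 0).map
    (fun l => String.ofList l)

-- ===== PORT B =====
-- B's while loop: pop the top of the stack (stack.pop() = last element + remaining
-- stack, rendered functionally as getLast/dropLast); if another element remains pop
-- it too and emit second ++ first, else emit the lone first.
def popLoop (stack scada : List (List Char)) : List (List Char) :=
  if hne : stack = [] then scada
  else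
    let first := stack.getLast hne
    let stack1 := stack.dropLast
    if hne2 : stack1 = [] then scada ++ [first]
    else popLoop stack1.dropLast (scada ++ [stack1.getLast hne2 ++ first])
  termination_by stack.length
  decreasing_by
    have := List.length_pos_of_ne_nil hne
    simp only [List.length_dropLast]
    omega

def transforma_dados_alt (dado_lido : String) : List String :=
  -- stack = [format(ord(c), 'x') for c in reversed(dado_lido)]
  let stack := dado_lido.toList.reverse.map (fun c => hexChars c.toNat)
  (popLoop stack []).map (fun l => String.ofList l)

-- ===== PRECONDITION & SPEC =====
def Spec_transforma_dados (dado_lido : String) (out : List String) : Prop := out = transforma_dados_alt dado_lido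
instance (dado_lido : String) (out : List String) : Decidable (Spec_transforma_dados dado_lido out) := by unfold Spec_transforma_dados; infer_instance

-- ===== CLAIM (what is proved, stated in full; the proofs are below) =====
def Claim_equal_transforma_dados : Prop := ∀ (dado_lido : String), Dom_transforma_dados dado_lido → Spec_transforma_dados dado_lido (transforma_dados dado_lido)

-- ===== LEMMAS AND PROOFS =====

-- proof-side characterisation of the pairing both programs perform
def pairsB : List (List Char) → List (List Char)
  | a :: b :: rest => (b ++ a) :: pairsB rest
  | h => h

theorem transformaLoop_eq (aux : List (List Char)) :
    ∀ (n t : Nat) (scada : List (List Char)), aux.length - t ≤ n →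
      transformaLoop aux scada t =
        scada ++ pairsB ((aux.drop t).map (fun x => PySem.List.slice x (some 2) none)) := by
  intro n
  induction n with
  | zero =>
    intro t scada h
    rw [transformaLoop]
    have hlt : ¬ t < aux.length := by omega
    simp [hlt, List.drop_eq_nil_of_le (by omega : aux.length ≤ t), pairsB]
  | succ n ih =>
    intro t scada h
    rw [transformaLoop]
    by_cases hlt : t < aux.length
    · simp only [hlt, if_true]
      have hdrop : aux.drop t = aux[t] :: aux.drop (t + 1) := List.drop_eq_getElem_cons hlt
      by_cases hlast : t ≠ aux.length - 1
      · have hlt1 : t + 1 < aux.length := by omega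
        have hdrop1 : aux.drop (t + 1) = aux[t + 1] :: aux.drop (t + 2) :=
          List.drop_eq_getElem_cons hlt1
        rw [if_pos hlast]
        rw [ih (t + 2) _ (by omega)]
        have g1 : PySem.List.pyGetD aux ((t : Int) + 1) [] = aux[t + 1] := by
          have : ((t : Int) + 1) = ((t + 1 : Nat) : Int) := by push_cast; ring
          rw [this, PySem.List.pyGetD_natCast, List.getD_eq_getElem _ _ hlt1]
        have g0 : PySem.List.pyGetD aux (t : Int) [] = aux[t] := by
          rw [PySem.List.pyGetD_natCast, List.getD_eq_getElem _ _ hlt]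
        rw [g0, g1, hdrop, hdrop1]
        simp only [List.map_cons, pairsB, List.append_assoc, List.singleton_append]
      · have hdrop1 : aux.drop (t + 1) = [] := List.drop_eq_nil_of_le (by omega)
        rw [if_neg hlast]
        rw [ih (t + 2) _ (by omega)]
        have g0 : PySem.List.pyGetD aux (t : Int) [] = aux[t] := by
          rw [PySem.List.pyGetD_natCast, List.getD_eq_getElem _ _ hlt]
        have hdrop2 : aux.drop (t + 2) = [] := List.drop_eq_nil_of_le (by omega)
        rw [g0, hdrop, hdrop1, hdrop2]
        simp only [List.map_cons, List.map_nil, pairsB, List.append_assoc, List.singleton_append]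
    · simp [hlt, List.drop_eq_nil_of_le (by omega : aux.length ≤ t), pairsB]

theorem slice_two_prefix (h : List Char) :
    PySem.List.slice ('0' :: 'x' :: h) (some 2) none = h := by
  rw [PySem.List.slice_from (xs := '0' :: 'x' :: h) (a := 2) (by omega)]
  simp

-- B's pop loop on the reversed list realises exactly the pairing pairsB of the original order
theorem popLoop_reverse : ∀ (l scada : List (List Char)),
    popLoop l.reverse scada = scada ++ pairsB l := by
  intro l
  induction l using pairsB.induct with
  | case1 a b rest ih =>
    intro scada
    have hrev : (a :: b :: rest).reverse = (rest.reverse ++ [b]) ++ [a] := by simp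
    rw [hrev, popLoop]
    simp [pairsB, ih]
  | case2 h hne =>
    match h, hne with
    | [], _ => intro scada; rw [popLoop]; simp [pairsB]
    | [a], _ =>
      intro scada
      have hrev : ([a] : List (List Char)).reverse = [] ++ [a] := by simp
      rw [hrev, popLoop]
      simp [pairsB]
    | a :: b :: r, hne => exact (hne a b r rfl).elim

-- ===== VERDICT (by name: the statement is the Claim_ definition above) =====
theorem transforma_dados_spec : Claim_equal_transforma_dados := by
  intro dado_lido _
  unfold Spec_transforma_dados transforma_dados transforma_dados_alt
  rw [PySem.List.foldl_append_singleton_eq_map]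
  simp only [List.nil_append]
  rw [transformaLoop_eq _ (dado_lido.toList.map (fun i => ['0', 'x'] ++ hexChars i.toNat)).length
        0 [] (by omega)]
  simp only [List.drop_zero, List.nil_append, List.map_map]
  have hmap : dado_lido.toList.map
      ((fun x => PySem.List.slice x (some 2) none) ∘ fun i => ['0', 'x'] ++ hexChars i.toNat) =
      dado_lido.toList.map (fun c => hexChars c.toNat) := by
    apply List.map_congr_left
    intro c _
    simp [Function.comp, slice_two_prefix]
  rw [hmap, List.map_reverse, popLoop_reverse]
  simp
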